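-- pv_equiv track=rewrite | github.com/jmmcd/GPDistance | python/RandomWalks/generate_trees.py | count_trees_of_depth
-- ===== SOURCE A (Python) =====
-- def count_trees_of_depth(n, vars, fns):
--     """Count the trees of depth exactly n."""
--     if n == 0:
--         return len(vars)
--     else:
--         # there are len(fns.keys()) ways to choose the root
--
--         # then you can choose trees of depth n-1 for *both* subtrees.
--         # that gives count_trees_of_depth(n-1) ** 2
--
--         # otherwise, you must choose a left subtree of depth n-1, and
--         # a right subtree of any depth less than that. that gives the
--         # sum of count_trees_of_depth(n-1) * count_trees_of_depth(m),
--         # with m ranging from 0 up to n-2 inclusive.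
--
--         # or you can do vice versa (right subtree of depth n-1, left
--         # subtree of any depth less than that). so multiply previous
--         # quantity by 2.
--         return len(fns.keys()) * (
--             count_trees_of_depth(n-1, vars, fns) **
--             2 + sum(2 * count_trees_of_depth(n-1, vars, fns)
--                     * count_trees_of_depth(m, vars, fns)
--                     for m in range(n-1)))
-- ===== SOURCE B (Python) =====
-- def count_trees_of_depth(n, vars_, fns):
--     """Count the trees of depth exactly n (bottom-up DP with a running prefix sum).
--
--     (second parameter renamed vars_ only because it shadows the builtin)"""
--     c, s = len(vars_), 0         # c = count at current depth, s = sum of counts at all smaller depths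
--     for _ in range(n):
--         c, s = len(fns) * (c * c + 2 * c * s), s + c
--     return c
-- ===== Notes on version B (the rewrite author's own statement) =====
-- stated objective: alternative
-- what changed: Replaces the exponential top-down recursion (which recomputes every smaller depth at each step) with a single bottom-up loop carrying the current depth's count and a running prefix sum of all smaller-depth counts; intended as asymptotically faster (O(n) arithmetic steps vs exponentially many calls), measured 12.5x at n=16 but unconfirmed at larger n where the result integers themselves become astronomically large.
import Mathlib
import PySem

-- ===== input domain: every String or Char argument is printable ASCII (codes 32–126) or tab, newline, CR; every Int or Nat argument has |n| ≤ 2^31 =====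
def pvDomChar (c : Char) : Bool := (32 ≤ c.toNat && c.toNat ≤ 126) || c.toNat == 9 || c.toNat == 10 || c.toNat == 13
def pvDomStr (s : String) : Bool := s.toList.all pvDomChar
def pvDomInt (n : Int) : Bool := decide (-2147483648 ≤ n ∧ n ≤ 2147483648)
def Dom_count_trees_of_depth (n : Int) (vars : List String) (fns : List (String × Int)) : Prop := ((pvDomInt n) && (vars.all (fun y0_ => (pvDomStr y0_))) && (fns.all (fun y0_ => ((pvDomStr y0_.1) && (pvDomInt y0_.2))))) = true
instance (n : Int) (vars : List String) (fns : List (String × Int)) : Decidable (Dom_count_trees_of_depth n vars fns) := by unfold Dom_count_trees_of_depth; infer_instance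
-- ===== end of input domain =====

-- B replaces A's top-down recursion by a bottom-up loop with a running prefix sum (a different algorithm); equal for all n ≥ 0 (A raises RecursionError for n < 0).

-- ===== PORT A =====
-- A recurses on n-1 down to 0; the Int depth is encoded as Nat fuel (exact for n ≥ 0, which Pre_ demands).
-- `lv` = len(vars), `k` = len(fns.keys()); the generator-sum over range(n-1) is the map-sum below.
def countA (lv k : Int) : Nat → Int
  | 0 => lv
  | Nat.succ m =>
      k * (countA lv k m ^ 2 +
        ((List.range m).attach.map (fun j => 2 * countA lv k m * countA lv k j.1)).sum)
  decreasing_by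
  · omega
  · exact Nat.lt_succ_of_lt (List.mem_range.mp j.2)

def count_trees_of_depth (n : Int) (vars : List String) (fns : List (String × Int)) : Int :=
  countA vars.length ((PySem.Dict.ofList fns).size) n.toNat

-- ===== PORT B =====
def count_trees_of_depth_alt (n : Int) (vars : List String) (fns : List (String × Int)) : Int :=
  ((List.range n.toNat).foldl
      (fun (cs : Int × Int) _ =>
        (((PySem.Dict.ofList fns).size : Int) * (cs.1 * cs.1 + 2 * cs.1 * cs.2), cs.2 + cs.1))
      ((vars.length : Int), 0)).1

-- ===== PRECONDITION & SPEC =====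
-- Pre_ excludes n < 0, on which A's recursion never terminates (RecursionError).
def Pre_count_trees_of_depth (n : Int) (vars : List String) (fns : List (String × Int)) : Prop := 0 ≤ n
instance (n : Int) (vars : List String) (fns : List (String × Int)) : Decidable (Pre_count_trees_of_depth n vars fns) := by unfold Pre_count_trees_of_depth; infer_instance
def pvWitness_count_trees_of_depth : Int × List String × (List (String × Int)) := (3, ["x", "y"], [("f", 2)])

def Spec_count_trees_of_depth (n : Int) (vars : List String) (fns : List (String × Int)) (out : Int) : Prop := out = count_trees_of_depth_alt n vars fns
instance (n : Int) (vars : List String) (fns : List (String × Int)) (out : Int) : Decidable (Spec_count_trees_of_depth n vars fns out) := by unfold Spec_count_trees_of_depth; infer_instance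

-- ===== CLAIM (what is proved, stated in full; the proofs are below) =====
def Claim_equal_count_trees_of_depth : Prop := ∀ (n : Int) (vars : List String) (fns : List (String × Int)), Dom_count_trees_of_depth n vars fns → Pre_count_trees_of_depth n vars fns → Spec_count_trees_of_depth n vars fns (count_trees_of_depth n vars fns)

-- ===== LEMMAS AND PROOFS =====

lemma sum_map_mul_left_int {α : Type} (l : List α) (a : Int) (f : α → Int) :
    (l.map (fun x => a * f x)).sum = a * (l.map f).sum := by
  induction l with
  | nil => simp
  | cons x xs ih => simp [List.map_cons, List.sum_cons, ih, mul_add]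

-- loop invariant: after d iterations the pair is (c_d, Σ_{m<d} c_m)
lemma foldl_countA (lv k : Int) (d : Nat) :
    (List.range d).foldl
      (fun (cs : Int × Int) _ => (k * (cs.1 * cs.1 + 2 * cs.1 * cs.2), cs.2 + cs.1))
      (lv, 0)
    = (countA lv k d, ((List.range d).map (countA lv k)).sum) := by
  induction d with
  | zero => simp [countA]
  | succ m ih =>
      rw [List.range_succ, List.foldl_append, ih]
      simp only [List.foldl_cons, List.foldl_nil, Prod.mk.injEq]
      refine ⟨?_, ?_⟩
      · rw [countA]
        have h1 : ((List.range m).attach.map (fun j => 2 * countA lv k m * countA lv k j.1)).sum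
            = ((List.range m).map (fun j => 2 * countA lv k m * countA lv k j)).sum := by
          simp
        rw [h1, sum_map_mul_left_int (List.range m) (2 * countA lv k m) (countA lv k)]; ring
      · simp [List.map_append, List.sum_append, add_comm]

theorem count_trees_of_depth_spec : Claim_equal_count_trees_of_depth := by
  intro n vars fns _ _
  unfold Spec_count_trees_of_depth count_trees_of_depth count_trees_of_depth_alt
  rw [foldl_countA]
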